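-- pv_equiv track=rewrite | github.com/jmontp/LocoHub | agent_framework/integration_agent/success_criteria.py | _generate_quality_actions
-- ===== SOURCE A (Python) =====
-- from typing import Dict, List, Optional, Any, Union
--
-- def _generate_quality_actions(failed_checks: List[str]) -> List[str]:
--     """Generate required actions for quality issues"""
--     actions = []
--     for check in failed_checks:
--         if "Test coverage" in check:
--             actions.append("Increase test coverage to meet requirements")
--         elif "Code quality" in check:
--             actions.append("Improve code quality to meet standards")
--         elif "Documentation" in check:
--             actions.append("Complete missing documentation")
--         elif "Process compliance" in check:
--             actions.append("Ensure full process compliance")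
--     return actions
-- ===== SOURCE B (Python) =====
-- _QUALITY_ACTION_TABLE = [
--     ("Test coverage", "Increase test coverage to meet requirements"),
--     ("Code quality", "Improve code quality to meet standards"),
--     ("Documentation", "Complete missing documentation"),
--     ("Process compliance", "Ensure full process compliance"),
-- ]
--
-- def _generate_quality_actions(failed_checks):
--     """Generate required actions for quality issues.
--
--     Staged passes: one full pass over the input per table entry, filling a
--     parallel slot array (first pass to fill a slot wins, preserving the
--     original elif precedence), then a final filter of the filled slots.
--     """
--     result = [None] * len(failed_checks)
--     for key, msg in _QUALITY_ACTION_TABLE: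
--         for i, check in enumerate(failed_checks):
--             if result[i] is None and key in check:
--                 result[i] = msg
--     return [m for m in result if m is not None]
-- ===== Notes on version B (the rewrite author's own statement) =====
-- stated objective: alternative
-- what changed: Instead of A's single pass appending the first elif match per check, B makes one staged pass over the whole input per (substring, message) table entry, filling a parallel slot array (earlier passes win, preserving precedence), and finally filters the filled slots.
import Mathlib
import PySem

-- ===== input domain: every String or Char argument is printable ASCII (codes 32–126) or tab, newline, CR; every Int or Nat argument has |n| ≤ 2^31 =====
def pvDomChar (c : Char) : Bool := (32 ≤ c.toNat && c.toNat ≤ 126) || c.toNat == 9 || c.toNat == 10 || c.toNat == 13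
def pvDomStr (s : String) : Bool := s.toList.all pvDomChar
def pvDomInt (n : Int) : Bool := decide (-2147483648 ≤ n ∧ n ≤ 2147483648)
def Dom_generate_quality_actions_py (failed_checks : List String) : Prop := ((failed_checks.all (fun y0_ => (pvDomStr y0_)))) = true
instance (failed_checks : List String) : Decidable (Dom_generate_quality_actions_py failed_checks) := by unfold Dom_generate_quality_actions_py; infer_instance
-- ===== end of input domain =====

-- B replaces A's single appending pass by staged passes: one full pass over the input
-- per (substring, message) table entry filling a parallel slot array (first fill wins),
-- then a filter of the filled slots; alternative decomposition, same cost.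

-- ===== PORT A =====
def generate_quality_actions_py (failed_checks : List String) : List String :=
  failed_checks.foldl (fun actions check =>
    if PySem.Str.isIn "Test coverage" check then
      actions ++ ["Increase test coverage to meet requirements"]
    else if PySem.Str.isIn "Code quality" check then
      actions ++ ["Improve code quality to meet standards"]
    else if PySem.Str.isIn "Documentation" check then
      actions ++ ["Complete missing documentation"]
    else if PySem.Str.isIn "Process compliance" check then
      actions ++ ["Ensure full process compliance"]
    else actions) []

-- ===== PORT B =====
def qualityActionTable : List (String × String) :=
  [("Test coverage", "Increase test coverage to meet requirements"),
   ("Code quality", "Improve code quality to meet standards"),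
   ("Documentation", "Complete missing documentation"),
   ("Process compliance", "Ensure full process compliance")]

-- one staged pass: 'for i, check in enumerate(failed_checks): if result[i] is None and key in check: result[i] = msg'
def qualityPass (key msg : String) (failed_checks : List String)
    (result : List (Option String)) : List (Option String) :=
  List.zipWith (fun r check => if r = none ∧ PySem.Str.isIn key check then some msg else r)
    result failed_checks

def generate_quality_actions_py_alt (failed_checks : List String) : List String :=
  (qualityActionTable.foldl
      (fun result p => qualityPass p.1 p.2 failed_checks result)
      (failed_checks.map (fun _ => (none : Option String)))).filterMap id

-- ===== PRECONDITION & SPEC =====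
def Spec_generate_quality_actions_py (failed_checks : List String) (out : List String) : Prop := out = generate_quality_actions_py_alt failed_checks
instance (failed_checks : List String) (out : List String) : Decidable (Spec_generate_quality_actions_py failed_checks out) := by unfold Spec_generate_quality_actions_py; infer_instance

-- ===== CLAIM (what is proved, stated in full; the proofs are below) =====
def Claim_equal_generate_quality_actions_py : Prop := ∀ (failed_checks : List String), Dom_generate_quality_actions_py failed_checks → Spec_generate_quality_actions_py failed_checks (generate_quality_actions_py failed_checks)

-- ===== LEMMAS AND PROOFS =====

-- the per-check first-match over a table, as an Option step
def firstMatchStep (check : String) (r : Option String) (p : String × String) : Option String :=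
  if r = none ∧ PySem.Str.isIn p.1 check then some p.2 else r

def firstMatch (tbl : List (String × String)) (check : String) : Option String :=
  tbl.foldl (firstMatchStep check) none

-- a zipWith of a pointwise step over (l.map g, l) is a map
theorem zipWith_map_self {α β : Type} (g : α → β) (h : β → α → β) :
    ∀ (l : List α), List.zipWith h (l.map g) l = l.map (fun c => h (g c) c) := by
  intro l; induction l with
  | nil => rfl
  | cons c cs ih => simp [ih]

-- folding the staged passes over the table maps firstMatch pointwise
theorem foldl_passes (tbl : List (String × String)) (failed_checks : List String)
    (g : String → Option String) :
    tbl.foldl (fun result p => qualityPass p.1 p.2 failed_checks result)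
        (failed_checks.map g)
      = failed_checks.map (fun c => tbl.foldl (firstMatchStep c) (g c)) := by
  induction tbl generalizing g with
  | nil => rfl
  | cons p ps ih =>
      simp only [List.foldl_cons]
      rw [show qualityPass p.1 p.2 failed_checks (failed_checks.map g)
            = failed_checks.map (fun c => firstMatchStep c (g c) p) from by
        simp only [qualityPass, zipWith_map_self, firstMatchStep]]
      exact ih _

-- A's elif chain computes, per check, exactly firstMatch over the table
theorem chain_eq_firstMatch (acc : List String) (check : String) :
    (if PySem.Str.isIn "Test coverage" check then
       acc ++ ["Increase test coverage to meet requirements"]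
     else if PySem.Str.isIn "Code quality" check then
       acc ++ ["Improve code quality to meet standards"]
     else if PySem.Str.isIn "Documentation" check then
       acc ++ ["Complete missing documentation"]
     else if PySem.Str.isIn "Process compliance" check then
       acc ++ ["Ensure full process compliance"]
     else acc) =
    acc ++ (firstMatch qualityActionTable check).toList := by
  cases h1 : PySem.Str.isIn "Test coverage" check <;>
  cases h2 : PySem.Str.isIn "Code quality" check <;>
  cases h3 : PySem.Str.isIn "Documentation" check <;>
  cases h4 : PySem.Str.isIn "Process compliance" check <;>
    simp_all [firstMatch, firstMatchStep, qualityActionTable]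

theorem a_eq_acc (failed_checks : List String) (acc : List String) :
    failed_checks.foldl (fun actions check =>
      if PySem.Str.isIn "Test coverage" check then
        actions ++ ["Increase test coverage to meet requirements"]
      else if PySem.Str.isIn "Code quality" check then
        actions ++ ["Improve code quality to meet standards"]
      else if PySem.Str.isIn "Documentation" check then
        actions ++ ["Complete missing documentation"]
      else if PySem.Str.isIn "Process compliance" check then
        actions ++ ["Ensure full process compliance"]
      else actions) acc
      = acc ++ failed_checks.flatMap (fun c => (firstMatch qualityActionTable c).toList) := by
  induction failed_checks generalizing acc with
  | nil => simp
  | cons c cs ih =>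
      simp only [List.foldl_cons, List.flatMap_cons]
      rw [chain_eq_firstMatch, ih, List.append_assoc]

theorem b_eq (failed_checks : List String) :
    generate_quality_actions_py_alt failed_checks
      = failed_checks.flatMap (fun c => (firstMatch qualityActionTable c).toList) := by
  unfold generate_quality_actions_py_alt
  rw [foldl_passes qualityActionTable failed_checks (fun _ => none)]
  rw [List.filterMap_map]
  simp only [Function.comp_def, id_eq]
  induction failed_checks with
  | nil => rfl
  | cons c cs ih =>
      simp only [List.filterMap_cons, List.flatMap_cons, firstMatch] at *
      cases h : List.foldl (firstMatchStep c) none qualityActionTable <;> simp [ih]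

-- ===== VERDICT =====
theorem generate_quality_actions_py_spec : Claim_equal_generate_quality_actions_py := by
  intro failed_checks _
  unfold Spec_generate_quality_actions_py generate_quality_actions_py
  rw [b_eq]
  simpa using a_eq_acc failed_checks []
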